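-- pv_equiv track=rewrite | github.com/zjrandom951/Annual_Reports_Analyzer | crawl_single_company.py | remove_duplicates_and_sort
-- ===== SOURCE A (Python) =====
-- def remove_duplicates_and_sort(pdf_urls_all, years_found_all):
--     unique_years = []
--     unique_urls = []
--
--     for i, year in enumerate(years_found_all):
--         if year not in unique_years:
--             unique_years.append(year)
--             unique_urls.append(pdf_urls_all[i])
--
--     # Sort the lists by years
--     sorted_indices = sorted(range(len(unique_years)), key=lambda k: unique_years[k])
--     sorted_urls = [unique_urls[i] for i in sorted_indices]
--     sorted_years = [unique_years[i] for i in sorted_indices]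
--
--     return sorted_urls, sorted_years
-- ===== SOURCE B (Python) =====
-- def remove_duplicates_and_sort(pdf_urls_all, years_found_all):
--     # Sort all indices by year first (stable), then one dedup pass keeping
--     # the first url seen for each year.
--     order = sorted(range(len(years_found_all)), key=lambda i: years_found_all[i])
--     seen = set()
--     sorted_urls = []
--     sorted_years = []
--     for i in order:
--         y = years_found_all[i]
--         if y not in seen:
--             seen.add(y)
--             sorted_urls.append(pdf_urls_all[i])
--             sorted_years.append(y)
--     return sorted_urls, sorted_years
-- ===== Notes on version B (the rewrite author's own statement) =====
-- stated objective: faster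
-- what changed: Flips the two phases: instead of deduplicating first (an O(u) list-membership scan per element) and then permuting the unique lists through an explicit sorted-indices argsort, B stably sorts ALL indices by year first and then makes one dedup pass with a seen-set, appending url and year directly.
import Mathlib
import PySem

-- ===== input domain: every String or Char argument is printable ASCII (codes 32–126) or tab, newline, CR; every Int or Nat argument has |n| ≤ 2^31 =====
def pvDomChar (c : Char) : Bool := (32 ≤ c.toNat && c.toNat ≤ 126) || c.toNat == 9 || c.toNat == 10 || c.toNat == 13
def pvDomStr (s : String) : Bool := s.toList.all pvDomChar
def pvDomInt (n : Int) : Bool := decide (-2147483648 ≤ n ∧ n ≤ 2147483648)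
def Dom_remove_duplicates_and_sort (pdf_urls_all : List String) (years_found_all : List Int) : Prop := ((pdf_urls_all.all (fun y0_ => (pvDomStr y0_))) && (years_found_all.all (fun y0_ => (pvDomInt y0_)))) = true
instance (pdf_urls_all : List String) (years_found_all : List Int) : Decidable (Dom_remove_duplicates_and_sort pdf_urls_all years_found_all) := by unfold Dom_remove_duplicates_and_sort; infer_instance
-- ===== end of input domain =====

-- B flips A's two phases: it stably sorts ALL indices by year first, then makes one dedup
-- pass with a seen-set, instead of deduplicating first (a per-element list-membership scan)
-- and permuting through an argsort; a timing run measured B faster.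

-- ===== PORT A =====
-- Literal port of A. pdf_urls_all[i] is ported as pyGetD with default "": Pre_ guarantees
-- every index actually read is in range (Python raises IndexError exactly outside Pre_).
def remove_duplicates_and_sort (pdf_urls_all : List String) (years_found_all : List Int) : List String × List Int :=
  let st := (PySem.List.enumerate years_found_all 0).foldl
    (fun (st : List Int × List String) p =>
      if p.2 ∈ st.1 then st
      else (st.1 ++ [p.2], st.2 ++ [PySem.List.pyGetD pdf_urls_all p.1 ""]))
    ([], [])
  let sorted_indices := PySem.List.sorted (PySem.List.pyRange 0 (st.1.length : Int) 1)
      (fun k => PySem.List.pyGetD st.1 k 0) false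
  (sorted_indices.map (fun i => PySem.List.pyGetD st.2 i ""),
   sorted_indices.map (fun i => PySem.List.pyGetD st.1 i 0))

-- ===== PORT B =====
-- Literal port of Source B: stable argsort of ALL indices by year, then one dedup pass with a
-- seen-set appending url and year. pdf_urls_all[i] is pyGetD with default "" (in range under Pre_).
def remove_duplicates_and_sort_alt (pdf_urls_all : List String) (years_found_all : List Int) : List String × List Int :=
  let order := PySem.List.sorted (PySem.List.pyRange 0 (years_found_all.length : Int) 1)
      (fun i => PySem.List.pyGetD years_found_all i 0) false
  let st := order.foldl
    (fun (st : PySem.Set Int × List String × List Int) i =>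
      let y := PySem.List.pyGetD years_found_all i 0
      if y ∈ st.1 then st
      else (PySem.Set.add st.1 y,
            st.2.1 ++ [PySem.List.pyGetD pdf_urls_all i ""],
            st.2.2 ++ [y]))
    (PySem.Set.empty, [], [])
  (st.2.1, st.2.2)

-- ===== PRECONDITION & SPEC =====
-- Pre_ excludes exactly the inputs on which Python A raises IndexError: a year whose first
-- occurrence index is not a valid index of pdf_urls_all.
def Pre_remove_duplicates_and_sort (pdf_urls_all : List String) (years_found_all : List Int) : Prop :=
  ∀ i : Nat, (h : i < years_found_all.length) →
    years_found_all[i] ∉ years_found_all.take i → i < pdf_urls_all.length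
instance (pdf_urls_all : List String) (years_found_all : List Int) : Decidable (Pre_remove_duplicates_and_sort pdf_urls_all years_found_all) := by unfold Pre_remove_duplicates_and_sort; infer_instance
def pvWitness_remove_duplicates_and_sort : List String × List Int := (["u1", "u2", "u3"], [2021, 2019, 2021])

def Spec_remove_duplicates_and_sort (pdf_urls_all : List String) (years_found_all : List Int) (out : List String × List Int) : Prop := out = remove_duplicates_and_sort_alt pdf_urls_all years_found_all
instance (pdf_urls_all : List String) (years_found_all : List Int) (out : List String × List Int) : Decidable (Spec_remove_duplicates_and_sort pdf_urls_all years_found_all out) := by unfold Spec_remove_duplicates_and_sort; infer_instance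

-- ===== CLAIM (what is proved, stated in full; the proofs are below) =====
def Claim_equal_remove_duplicates_and_sort : Prop := ∀ (pdf_urls_all : List String) (years_found_all : List Int), Dom_remove_duplicates_and_sort pdf_urls_all years_found_all → Pre_remove_duplicates_and_sort pdf_urls_all years_found_all → Spec_remove_duplicates_and_sort pdf_urls_all years_found_all (remove_duplicates_and_sort pdf_urls_all years_found_all)

-- ===== LEMMAS AND PROOFS =====

-- The common skeleton of both dedup passes: scan the index list, keep an index when its key (year) is new.
def pvDedupBy (key : Int → Int) : List Int → List Int → List Int
  | [], _ => []
  | i :: t, s => if key i ∈ s then pvDedupBy key t s else i :: pvDedupBy key t (s ++ [key i])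

theorem foldA_eq (key : Int → Int) (url : Int → String) (l : List Int) : ∀ (J : List Int),
    l.foldl (fun (st : List Int × List String) j =>
        if key j ∈ st.1 then st else (st.1 ++ [key j], st.2 ++ [url j]))
      (J.map key, J.map url)
    = ((J ++ pvDedupBy key l (J.map key)).map key,
       (J ++ pvDedupBy key l (J.map key)).map url) := by
  induction l with
  | nil => intro J; simp [pvDedupBy]
  | cons i t ih =>
    intro J
    by_cases h : key i ∈ J.map key
    · simp only [List.foldl_cons, if_pos h, pvDedupBy, ih]
    · simp only [List.foldl_cons, if_neg h, pvDedupBy]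
      have := ih (J ++ [i])
      simp only [List.map_append, List.map_cons, List.map_nil] at this ⊢
      simpa [List.append_assoc] using this

theorem foldB_eq (key : Int → Int) (url : Int → String) (l : List Int) : ∀ (J : List Int),
    (hnd : (J.map key).Nodup) →
    l.foldl (fun (st : PySem.Set Int × List String × List Int) i =>
        if key i ∈ st.1 then st
        else (PySem.Set.add st.1 (key i), st.2.1 ++ [url i], st.2.2 ++ [key i]))
      (J.map key, J.map url, J.map key)
    = ((J ++ pvDedupBy key l (J.map key)).map key,
       (J ++ pvDedupBy key l (J.map key)).map url,
       (J ++ pvDedupBy key l (J.map key)).map key) := by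
  induction l with
  | nil => intro J _; simp [pvDedupBy]
  | cons i t ih =>
    intro J hnd
    by_cases h : key i ∈ J.map key
    · simp only [List.foldl_cons, if_pos h, pvDedupBy, ih J hnd]
    · simp only [List.foldl_cons, if_neg h, pvDedupBy]
      have hadd : PySem.Set.add (J.map key) (key i) = J.map key ++ [key i] := by
        simp [PySem.Set.add, h]
      have hnd' : ((J ++ [i]).map key).Nodup := by
        simp only [List.map_append, List.map_cons, List.map_nil]
        exact List.Nodup.append hnd (List.nodup_singleton _) (fun a ha hb => by simp only [List.mem_singleton] at hb; subst hb; exact h ha)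
      have := ih (J ++ [i]) hnd'
      simp only [List.map_append, List.map_cons, List.map_nil] at this ⊢
      rw [hadd]
      simpa [List.append_assoc] using this

theorem pvDedupBy_sublist (key : Int → Int) (l : List Int) : ∀ s, (pvDedupBy key l s).Sublist l := by
  induction l with
  | nil => intro s; simp [pvDedupBy]
  | cons i t ih =>
    intro s
    simp only [pvDedupBy]
    split
    · exact (ih s).cons i
    · exact (ih (s ++ [key i])).cons₂ i

theorem pvDedupBy_keys_nodup (key : Int → Int) (l : List Int) : ∀ s, s.Nodup →
    (s ++ (pvDedupBy key l s).map key).Nodup := by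
  induction l with
  | nil => intro s hs; simpa [pvDedupBy]
  | cons i t ih =>
    intro s hs
    simp only [pvDedupBy]
    split
    · exact ih s hs
    · rename_i h
      have := ih (s ++ [key i]) (by
        exact List.Nodup.append hs (List.nodup_singleton _) (fun a ha hb => by simp only [List.mem_singleton] at hb; subst hb; exact h ha))
      simpa [List.append_assoc] using this

theorem pvDedupBy_mem (key : Int → Int) (l : List Int) : ∀ (s : List Int) (x : Int),
    x ∈ pvDedupBy key l s
      ↔ key x ∉ s ∧ ∃ l1 l2, l = l1 ++ x :: l2 ∧ ∀ y ∈ l1, key y ≠ key x := by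
  induction l with
  | nil =>
    intro s x
    simp only [pvDedupBy, List.not_mem_nil, false_iff, not_and]
    rintro _ ⟨l1, l2, h, -⟩
    exact (List.append_ne_nil_of_right_ne_nil l1 (List.cons_ne_nil x l2) h.symm).elim
  | cons i t ih =>
    intro s x
    by_cases h : key i ∈ s
    · rw [pvDedupBy, if_pos h, ih]
      constructor
      · rintro ⟨hx, l1, l2, rfl, hcond⟩
        refine ⟨hx, i :: l1, l2, rfl, ?_⟩
        intro y hy
        rcases List.mem_cons.mp hy with rfl | hy
        · exact fun he => hx (he ▸ h)
        · exact hcond y hy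
      · rintro ⟨hx, l1, l2, hdec, hcond⟩
        refine ⟨hx, ?_⟩
        cases l1 with
        | nil =>
          simp only [List.nil_append, List.cons.injEq] at hdec
          exact absurd (hdec.1 ▸ h) hx
        | cons a l1' =>
          simp only [List.cons_append, List.cons.injEq] at hdec
          exact ⟨l1', l2, hdec.2, fun y hy => hcond y (List.mem_cons_of_mem a hy)⟩
    · rw [pvDedupBy, if_neg h]
      simp only [List.mem_cons, ih]
      constructor
      · rintro (rfl | ⟨hx, l1, l2, rfl, hcond⟩)
        · exact ⟨h, [], t, rfl, by simp⟩
        · have hxs : key x ∉ s := fun hxs => hx (List.mem_append_left _ hxs)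
          have hxi : key x ≠ key i := fun he => hx (by simp [he])
          exact ⟨hxs, i :: l1, l2, rfl, fun y hy => by
            rcases List.mem_cons.mp hy with rfl | hy
            · exact fun he => hxi he.symm
            · exact hcond y hy⟩
      · rintro ⟨hx, l1, l2, hdec, hcond⟩
        cases l1 with
        | nil =>
          simp only [List.nil_append, List.cons.injEq] at hdec
          exact Or.inl hdec.1.symm
        | cons a l1' =>
          simp only [List.cons_append, List.cons.injEq] at hdec
          refine Or.inr ⟨?_, l1', l2, hdec.2, fun y hy => hcond y (List.mem_cons_of_mem a hy)⟩
          intro hmem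
          rcases List.mem_append.mp hmem with hmem | hmem
          · exact hx hmem
          · simp only [List.mem_singleton] at hmem
            exact hcond a (List.mem_cons_self) (hdec.1 ▸ hmem.symm)

theorem insertBy_pairwise_lex (key : Int → Int) (x : Int) : ∀ (ys : List Int),
    ys.Pairwise (fun a b => key a < key b ∨ (key a = key b ∧ a < b)) →
    (∀ a ∈ ys, a < x) →
    (PySem.List.insertBy (fun a b => decide (key a < key b)) x ys).Pairwise
      (fun a b => key a < key b ∨ (key a = key b ∧ a < b)) := by
  intro ys
  induction ys with
  | nil => intro _ _; simp [PySem.List.insertBy]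
  | cons y t ih =>
    intro hp hlt
    rw [List.pairwise_cons] at hp
    show (if decide (key x < key y) = true then x :: y :: t
          else y :: PySem.List.insertBy (fun a b => decide (key a < key b)) x t).Pairwise _
    split
    · rename_i hxy
      rw [decide_eq_true_iff] at hxy
      refine List.Pairwise.cons ?_ (List.pairwise_cons.mpr hp)
      intro z hz
      rcases List.mem_cons.mp hz with rfl | hz
      · exact Or.inl hxy
      · rcases hp.1 z hz with h1 | h1
        · exact Or.inl (lt_trans hxy h1)
        · exact Or.inl (h1.1 ▸ hxy)
    · rename_i hxy
      rw [decide_eq_true_iff] at hxy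
      push Not at hxy
      refine List.Pairwise.cons ?_ (ih hp.2 (fun a ha => hlt a (List.mem_cons_of_mem y ha)))
      intro z hz
      rcases (PySem.List.mem_insertBy _ _ _ _).mp hz with rfl | hz
      · rcases lt_or_eq_of_le hxy with h1 | h1
        · exact Or.inl h1
        · exact Or.inr ⟨h1, hlt y List.mem_cons_self⟩
      · exact hp.1 z hz

theorem sorted_pairwise_lex (key : Int → Int) (xs : List Int) (hx : xs.Pairwise (· < ·)) :
    (PySem.List.sorted xs key false).Pairwise
      (fun a b => key a < key b ∨ (key a = key b ∧ a < b)) := by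
  rw [PySem.List.sorted_eq_foldl_insertBy]
  suffices h : ∀ (ys : List Int), ys.Pairwise (· < ·) →
      ∀ (acc : List Int),
      acc.Pairwise (fun a b => key a < key b ∨ (key a = key b ∧ a < b)) →
      (∀ a ∈ acc, ∀ b ∈ ys, a < b) →
      (ys.foldl (fun acc x => PySem.List.insertBy (fun a b => decide (key a < key b)) x acc) acc).Pairwise
        (fun a b => key a < key b ∨ (key a = key b ∧ a < b)) by
    exact h xs hx [] List.Pairwise.nil (by simp)
  intro ys
  induction ys with
  | nil => intro _ acc hacc _; simpa using hacc
  | cons x t ih =>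
    intro hp acc hacc hord
    rw [List.pairwise_cons] at hp
    refine ih hp.2 _ (insertBy_pairwise_lex key x acc hacc (fun a ha => hord a ha x List.mem_cons_self)) ?_
    intro a ha b hb
    rcases (PySem.List.mem_insertBy _ _ _ _).mp ha with rfl | ha
    · exact hp.1 b hb
    · exact hord a ha b (List.mem_cons_of_mem x hb)

theorem memF_iff (key : Int → Int) (n : Int) (x : Int) :
    x ∈ pvDedupBy key (PySem.List.pyRange 0 n 1) []
      ↔ (0 ≤ x ∧ x < n) ∧ ∀ j, 0 ≤ j → j < x → key j ≠ key x := by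
  rw [pvDedupBy_mem]
  simp only [List.not_mem_nil, not_false_eq_true, true_and]
  constructor
  · rintro ⟨l1, l2, hdec, hcond⟩
    have hx : x ∈ PySem.List.pyRange 0 n 1 := by rw [hdec]; simp
    have hb := PySem.List.mem_pyRange_one.mp hx
    refine ⟨hb, ?_⟩
    intro j h0 hj heq
    have hjmem : j ∈ PySem.List.pyRange 0 n 1 :=
      PySem.List.mem_pyRange_one.mpr ⟨h0, lt_trans hj hb.2⟩
    rw [hdec] at hjmem
    rcases List.mem_append.mp hjmem with hm | hm
    · exact hcond j hm heq
    · rcases List.mem_cons.mp hm with rfl | hm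
      · omega
      · have hpw := PySem.List.pairwise_lt_pyRange_one 0 n
        rw [hdec] at hpw
        have := (List.pairwise_cons.mp (List.pairwise_append.mp hpw).2.1).1 j hm
        omega
  · rintro ⟨⟨h0, hn⟩, hfirst⟩
    refine ⟨PySem.List.pyRange 0 x 1, PySem.List.pyRange (x+1) n 1, ?_, ?_⟩
    · rw [PySem.List.pyRange_one_append 0 x n h0 (le_of_lt hn), PySem.List.pyRange_one_cons hn]
    · intro y hy
      have := PySem.List.mem_pyRange_one.mp hy
      exact hfirst y this.1 this.2

theorem memK_iff (key : Int → Int) (n : Int) (x : Int) :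
    x ∈ pvDedupBy key (PySem.List.sorted (PySem.List.pyRange 0 n 1) key false) []
      ↔ (0 ≤ x ∧ x < n) ∧ ∀ j, 0 ≤ j → j < x → key j ≠ key x := by
  have hpw : (PySem.List.sorted (PySem.List.pyRange 0 n 1) key false).Pairwise
      (fun a b => key a < key b ∨ (key a = key b ∧ a < b)) :=
    sorted_pairwise_lex key _ (PySem.List.pairwise_lt_pyRange_one 0 n)
  rw [pvDedupBy_mem]
  simp only [List.not_mem_nil, not_false_eq_true, true_and]
  constructor
  · rintro ⟨l1, l2, hdec, hcond⟩
    have hx : x ∈ PySem.List.pyRange 0 n 1 := by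
      rw [← PySem.List.mem_sorted _ key false, hdec]; simp
    have hb := PySem.List.mem_pyRange_one.mp hx
    refine ⟨hb, ?_⟩
    intro j h0 hj heq
    have hjmem : j ∈ l1 ++ x :: l2 := by
      rw [← hdec, PySem.List.mem_sorted]
      exact PySem.List.mem_pyRange_one.mpr ⟨h0, lt_trans hj hb.2⟩
    rw [hdec] at hpw
    rcases List.mem_append.mp hjmem with hm | hm
    · exact hcond j hm heq
    · rcases List.mem_cons.mp hm with rfl | hm
      · omega
      · rcases (List.pairwise_cons.mp (List.pairwise_append.mp hpw).2.1).1 j hm with h1 | h1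
        · omega
        · omega
  · rintro ⟨⟨h0, hn⟩, hfirst⟩
    have hx : x ∈ PySem.List.sorted (PySem.List.pyRange 0 n 1) key false := by
      rw [PySem.List.mem_sorted]
      exact PySem.List.mem_pyRange_one.mpr ⟨h0, hn⟩
    obtain ⟨l1, l2, hdec⟩ := List.append_of_mem hx
    refine ⟨l1, l2, hdec, ?_⟩
    intro y hy heq
    rw [hdec] at hpw
    have hLex := (List.pairwise_append.mp hpw).2.2 y hy x List.mem_cons_self
    have hymem : y ∈ PySem.List.pyRange 0 n 1 := by
      rw [← PySem.List.mem_sorted _ key false, hdec]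
      exact List.mem_append_left _ hy
    have hyb := PySem.List.mem_pyRange_one.mp hymem
    rcases hLex with h1 | h1
    · omega
    · exact hfirst y hyb.1 h1.2 heq

theorem K_eq_G (key : Int → Int) (n : Int) :
    pvDedupBy key (PySem.List.sorted (PySem.List.pyRange 0 n 1) key false) []
      = PySem.List.sorted (pvDedupBy key (PySem.List.pyRange 0 n 1) []) key false := by
  set F := pvDedupBy key (PySem.List.pyRange 0 n 1) [] with hF
  set K := pvDedupBy key (PySem.List.sorted (PySem.List.pyRange 0 n 1) key false) [] with hK
  have hFnd : F.Nodup := (pvDedupBy_sublist key _ []).nodup (PySem.List.nodup_pyRange_one 0 n)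
  have hOnd : (PySem.List.sorted (PySem.List.pyRange 0 n 1) key false).Nodup :=
    ((PySem.List.sorted_perm _ key false).nodup_iff).mpr (PySem.List.nodup_pyRange_one 0 n)
  have hKnd : K.Nodup := (pvDedupBy_sublist key _ []).nodup hOnd
  have hperm : K.Perm F := by
    rw [List.perm_ext_iff_of_nodup hKnd hFnd]
    intro a
    rw [hK, hF, memK_iff, memF_iff]
  have hkeys : (K.map key).Nodup := by
    simpa using pvDedupBy_keys_nodup key _ [] List.nodup_nil
  have hlex : K.Pairwise (fun a b => key a < key b ∨ (key a = key b ∧ a < b)) :=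
    (sorted_pairwise_lex key _ (PySem.List.pairwise_lt_pyRange_one 0 n)).sublist
      (pvDedupBy_sublist key _ [])
  have hne : K.Pairwise (fun a b => key a ≠ key b) := List.pairwise_map.mp hkeys
  have hstrict : K.Pairwise (fun a b => key a < key b) := by
    refine (hlex.and hne).imp ?_
    rintro a b ⟨h1 | h1, h2⟩
    · exact h1
    · exact absurd h1.1 h2
  exact (PySem.List.sorted_eq_of_perm_of_pairwise_lt F K key hperm hstrict).symm

theorem A_sort_phase (key : Int → Int) (url : Int → String) (F : List Int)
    (hnd : (F.map key).Nodup) :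
    (((PySem.List.sorted (PySem.List.pyRange 0 ((F.map key).length : Int) 1)
        (fun k => PySem.List.pyGetD (F.map key) k 0) false).map
          (fun i => PySem.List.pyGetD (F.map url) i ""),
      (PySem.List.sorted (PySem.List.pyRange 0 ((F.map key).length : Int) 1)
        (fun k => PySem.List.pyGetD (F.map key) k 0) false).map
          (fun i => PySem.List.pyGetD (F.map key) i 0)) : List String × List Int)
    = ((PySem.List.sorted F key false).map url, (PySem.List.sorted F key false).map key) := by
  set ikey : Int → Int := fun k => PySem.List.pyGetD (F.map key) k 0 with hikey
  set rng := PySem.List.pyRange 0 ((F.map key).length : Int) 1 with hrng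
  set idx := PySem.List.sorted rng ikey false with hidx
  have hlen : (F.map key).length = F.length := by simp
  have hmem_rng : ∀ i ∈ idx, 0 ≤ i ∧ i < (F.length : Int) := by
    intro i hi
    have := PySem.List.mem_pyRange_one.mp ((PySem.List.mem_sorted rng ikey false i).mp hi)
    omega
  have hkey_eq : ∀ i ∈ idx, ikey i = key (PySem.List.pyGetD F i 0) := by
    intro i hi
    obtain ⟨h0, h1⟩ := hmem_rng i hi
    have hi' : i < ((F.map key).length : Int) := by omega
    show PySem.List.pyGetD (F.map key) i 0 = key (PySem.List.pyGetD F i 0)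
    rw [PySem.List.pyGetD_eq_getElem (F.map key) 0 h0 hi',
        PySem.List.pyGetD_eq_getElem F 0 h0 h1]
    simp
  have hurl_eq : ∀ i ∈ idx, PySem.List.pyGetD (F.map url) i "" = url (PySem.List.pyGetD F i 0) := by
    intro i hi
    obtain ⟨h0, h1⟩ := hmem_rng i hi
    have hi' : i < ((F.map url).length : Int) := by rw [List.length_map]; omega
    rw [PySem.List.pyGetD_eq_getElem (F.map url) "" h0 hi',
        PySem.List.pyGetD_eq_getElem F 0 h0 h1]
    simp
  set M := idx.map (fun k => PySem.List.pyGetD F k 0) with hM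
  have hrngF : rng.map (fun k => PySem.List.pyGetD F k 0) = F := by
    have := PySem.List.map_pyGetD_pyRange_zero F 0
    simpa [hrng, hlen] using this
  have hMperm : M.Perm F := by
    have h := (PySem.List.sorted_perm rng ikey false).map (fun k => PySem.List.pyGetD F k 0)
    rw [hrngF] at h
    exact h
  have hidx_nd : idx.Nodup :=
    ((PySem.List.sorted_perm rng ikey false).nodup_iff).mpr (PySem.List.nodup_pyRange_one _ _)
  have hpw_le : idx.Pairwise (fun a b => ikey a ≤ ikey b) := PySem.List.sorted_pairwise rng ikey
  have hpw : idx.Pairwise (fun a b => ikey a < ikey b) := by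
    have hne : idx.Pairwise (· ≠ ·) := hidx_nd
    refine ((hpw_le.and hne).imp_of_mem ?_)
    intro a b ha hb hab
    have ha' := hmem_rng a ha
    have hb' := hmem_rng b hb
    have hal : a.toNat < (F.map key).length := by omega
    have hbl : b.toNat < (F.map key).length := by omega
    have e1 : ikey a = (F.map key)[a.toNat] :=
      PySem.List.pyGetD_eq_getElem (F.map key) 0 ha'.1 (by omega)
    have e2 : ikey b = (F.map key)[b.toNat] :=
      PySem.List.pyGetD_eq_getElem (F.map key) 0 hb'.1 (by omega)
    refine lt_of_le_of_ne hab.1 ?_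
    rw [e1, e2]
    intro h
    exact hab.2 (by have := (hnd.getElem_inj_iff (hi := hal) (hj := hbl)).mp h; omega)
  have hMpw : M.Pairwise (fun a b => key a < key b) := by
    rw [hM, List.pairwise_map]
    refine hpw.imp_of_mem ?_
    intro a b ha hb hab
    rwa [hkey_eq a ha, hkey_eq b hb] at hab
  have hMG : PySem.List.sorted F key false = M :=
    PySem.List.sorted_eq_of_perm_of_pairwise_lt F M key hMperm hMpw
  refine Prod.ext ?_ ?_
  · show idx.map (fun i => PySem.List.pyGetD (F.map url) i "") = (PySem.List.sorted F key false).map url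
    rw [hMG, hM, List.map_map]
    exact List.map_congr_left hurl_eq
  · show idx.map (fun i => PySem.List.pyGetD (F.map key) i 0) = (PySem.List.sorted F key false).map key
    rw [hMG, hM, List.map_map]
    exact List.map_congr_left hkey_eq

-- ===== final assembly =====
theorem remove_duplicates_and_sort_spec : Claim_equal_remove_duplicates_and_sort := by
  intro urls ys _ _
  unfold Spec_remove_duplicates_and_sort
  set key : Int → Int := fun i => PySem.List.pyGetD ys i 0 with hkey
  set url : Int → String := fun i => PySem.List.pyGetD urls i "" with hurl
  set rng := PySem.List.pyRange 0 (ys.length : Int) 1 with hrngdef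
  set F := pvDedupBy key rng [] with hFdef
  -- A's first loop produces the first-occurrence indices F, mapped through year / url.
  have hA1 : (PySem.List.enumerate ys 0).foldl
      (fun (st : List Int × List String) p =>
        if p.2 ∈ st.1 then st
        else (st.1 ++ [p.2], st.2 ++ [PySem.List.pyGetD urls p.1 ""]))
      ([], [])
      = (F.map key, F.map url) := by
    rw [PySem.List.enumerate_eq_map_pyRange ys 0, List.foldl_map]
    have h := foldA_eq key url (PySem.List.pyRange 0 (PySem.List.len ys) 1) []
    simp only [List.map_nil, List.nil_append] at h
    simpa [hrngdef, hFdef, hkey, hurl] using h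
  -- B's loop is the dedup skeleton over the sorted index list.
  have hBport : remove_duplicates_and_sort_alt urls ys
      = ((pvDedupBy key (PySem.List.sorted rng key false) []).map url,
         (pvDedupBy key (PySem.List.sorted rng key false) []).map key) := by
    have h := foldB_eq key url (PySem.List.sorted rng key false) [] (by simp)
    simp only [List.map_nil, List.nil_append] at h
    exact congrArg (fun st : PySem.Set Int × List String × List Int => (st.2.1, st.2.2)) h
  have hKG : pvDedupBy key (PySem.List.sorted rng key false) []
      = PySem.List.sorted F key false := by
    rw [hrngdef, hFdef]
    exact K_eq_G key (ys.length : Int)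
  have hnd : (F.map key).Nodup := by
    simpa using pvDedupBy_keys_nodup key rng [] List.nodup_nil
  rw [hBport, hKG]
  unfold remove_duplicates_and_sort
  rw [hA1]
  exact A_sort_phase key url F hnd
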